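-- pv_equiv track=rewrite | github.com/yehoon17/programmers | python/Level 2/문자열의_아름다움.py | solution
-- ===== SOURCE A (Python) =====
-- def beauty(s, dp, i, k):
--     j = i + k
--
--     if s[i] != s[j]:
--         return j - i
--     else:
--         return max(dp[i], dp[i+1])
--
-- def solution(s):
--     answer = 0
--     size = len(s)
--     dp = [0 for _ in range(size)]
--     for k in range(1, size):
--         new_dp = []
--         for i in range(size-k):
--             new_dp.append(beauty(s, dp, i, k))
--         dp = new_dp
--         answer += sum(dp)
--     return answer
-- ===== SOURCE B (Python) =====
-- def solution(s):
--     n = len(s)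
--     pd = []  # pd[j] = largest q < j with s[q] != s[j], else -1
--     prev = -1
--     for j in range(n):
--         if j >= 1 and s[j - 1] != s[j]:
--             prev = j - 1
--         pd.append(prev)
--     nd = []  # nd[i] = smallest q > i with s[q] != s[i], else n
--     nxt = n
--     for i in range(n - 1, -1, -1):
--         if i < n - 1 and s[i + 1] != s[i]:
--             nxt = i + 1
--         nd.append(nxt)
--     nd.reverse()
--     # beauty(i, j) = max span of a differing-endpoint pair inside s[i..j]:
--     # it is attained with one endpoint at i or at j, giving a closed form via nd/pd.
--     ans = 0
--     for i in range(n):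
--         for j in range(i + 1, n):
--             if s[i] != s[j]:
--                 ans += j - i
--             elif nd[i] <= j:
--                 ans += max(pd[j] - i, j - nd[i])
--     return ans
-- ===== Notes on version B (the rewrite author's own statement) =====
-- stated objective: alternative
-- what changed: A fills a dp table length-by-length over all substrings (beauty of s[i..j] via the recurrence on dp rows); B instead precomputes nearest-differing-position arrays nd/pd in two linear passes and evaluates each pair (i,j) by a closed form (j-i if endpoints differ, else max(pd[j]-i, j-nd[i]) when the range is not uniform), summing directly over index pairs.
import Mathlib
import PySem

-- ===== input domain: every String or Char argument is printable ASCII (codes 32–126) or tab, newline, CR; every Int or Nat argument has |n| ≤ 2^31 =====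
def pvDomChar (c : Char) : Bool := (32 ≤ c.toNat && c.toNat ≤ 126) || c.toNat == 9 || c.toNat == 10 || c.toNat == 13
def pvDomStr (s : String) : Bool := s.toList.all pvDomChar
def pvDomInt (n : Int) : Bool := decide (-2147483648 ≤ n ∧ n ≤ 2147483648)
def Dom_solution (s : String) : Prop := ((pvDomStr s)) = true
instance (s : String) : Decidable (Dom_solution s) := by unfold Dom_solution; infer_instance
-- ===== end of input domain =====

-- B replaces A's length-by-length dynamic programming over all substrings by a closed form per
-- endpoint pair built from nearest-differing-position arrays (alternative algorithm, same O(n^2) cost).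

-- ===== PORT A =====
-- indices passed by `solution` are always in range, so pyGetD with default 0 is exact for dp[i], dp[i+1]
def beauty (s : List Char) (dp : List Int) (i k : Int) : Int :=
  let j := i + k
  if PySem.List.pyGet? s i ≠ PySem.List.pyGet? s j then j - i
  else max (PySem.List.pyGetD dp i 0) (PySem.List.pyGetD dp (i + 1) 0)

-- body of the loop `for k in range(1, size)`: state = (answer, dp)
def stepA (cs : List Char) (size : Int) (st : Int × List Int) (k : Int) : Int × List Int :=
  let new_dp := (PySem.List.pyRange 0 (size - k) 1).foldl
    (fun acc i => acc ++ [beauty cs st.2 i k]) []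
  (st.1 + new_dp.sum, new_dp)

def solution (s : String) : Int :=
  let cs := s.toList
  let size : Int := PySem.List.len cs
  let dp : List Int := (PySem.List.pyRange 0 size 1).map (fun _ => 0)
  ((PySem.List.pyRange 1 size 1).foldl (stepA cs size) (0, dp)).1

-- ===== PORT B =====
-- body of the loop building pd: state = (pd, prev)
def pdStep (cs : List Char) (st : List Int × Int) (j : Int) : List Int × Int :=
  let prev := if 1 ≤ j ∧ PySem.List.pyGet? cs (j - 1) ≠ PySem.List.pyGet? cs j then j - 1 else st.2
  (st.1 ++ [prev], prev)

-- body of the descending loop building nd: state = (nd, nxt)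
def ndStep (cs : List Char) (n : Int) (st : List Int × Int) (i : Int) : List Int × Int :=
  let nxt := if i < n - 1 ∧ PySem.List.pyGet? cs (i + 1) ≠ PySem.List.pyGet? cs i then i + 1 else st.2
  (st.1 ++ [nxt], nxt)

def solution_alt (s : String) : Int :=
  let cs := s.toList
  let n : Int := PySem.List.len cs
  let pd := ((PySem.List.pyRange 0 n 1).foldl (pdStep cs) ([], -1)).1
  let nd := (((PySem.List.pyRange (n - 1) (-1) (-1)).foldl (ndStep cs n) ([], n)).1).reverse
  (PySem.List.pyRange 0 n 1).foldl (fun ans i =>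
    (PySem.List.pyRange (i + 1) n 1).foldl (fun ans j =>
      if PySem.List.pyGet? cs i ≠ PySem.List.pyGet? cs j then ans + (j - i)
      else if PySem.List.pyGetD nd i 0 ≤ j then
        ans + max (PySem.List.pyGetD pd j 0 - i) (j - PySem.List.pyGetD nd i 0)
      else ans) ans) 0

-- ===== PRECONDITION & SPEC =====
def Spec_solution (s : String) (out : Int) : Prop := out = solution_alt s
instance (s : String) (out : Int) : Decidable (Spec_solution s out) := by unfold Spec_solution; infer_instance

-- ===== CLAIM (what is proved, stated in full; the proofs are below) =====
def Claim_equal_solution : Prop := ∀ (s : String), Dom_solution s → Spec_solution s (solution s)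

-- ===== LEMMAS AND PROOFS =====

-- the beauty value of the substring cs[i..j], via A's recurrence on the two endpoints
def fspec (cs : List Char) (i j : Nat) : Int :=
  if _h : i < j then
    if cs[i]? ≠ cs[j]? then (j : Int) - i
    else max (fspec cs i (j - 1)) (fspec cs (i + 1) j)
  else 0
termination_by j - i
decreasing_by all_goals omega

-- nd[i]: smallest q > i with cs[q] ≠ cs[i], else cs.length
def ndspec (cs : List Char) (i : Nat) : Nat :=
  if cs.length ≤ i + 1 then cs.length
  else if cs[i + 1]? ≠ cs[i]? then i + 1
  else ndspec cs (i + 1)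
termination_by cs.length - i
decreasing_by omega

-- pd[j]: largest q < j with cs[q] ≠ cs[j], else -1
def pdspec (cs : List Char) : Nat → Int
  | 0 => -1
  | j + 1 => if cs[j]? ≠ cs[j + 1]? then (j : Int) else pdspec cs j

-- dp row of A for substring length k
def rowA (cs : List Char) (k : Nat) : List Int :=
  (List.range (cs.length - k)).map (fun i => fspec cs i (i + k))

theorem fspec_self (cs : List Char) (i : Nat) : fspec cs i i = 0 := by
  rw [fspec]; simp

theorem nd_gt (cs : List Char) (i : Nat) (h : i < cs.length) : i < ndspec cs i := by
  rw [ndspec]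
  split_ifs with h1 h2
  · omega
  · omega
  · have := nd_gt cs (i + 1) (by omega)
    omega
termination_by cs.length - i
decreasing_by omega

theorem nd_le (cs : List Char) (i : Nat) : ndspec cs i ≤ cs.length := by
  rw [ndspec]
  split_ifs with h1 h2
  · omega
  · omega
  · exact nd_le cs (i + 1)
termination_by cs.length - i
decreasing_by omega

theorem nd_run (cs : List Char) (i q : Nat) (h1 : i < q) (h2 : q < ndspec cs i) :
    cs[q]? = cs[i]? := by
  rw [ndspec] at h2
  split_ifs at h2 with ha hb
  · omega
  · omega
  · push_neg at hb
    by_cases hq : q = i + 1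
    · rw [hq]; exact hb
    · exact (nd_run cs (i + 1) q (by omega) h2).trans hb
termination_by cs.length - i
decreasing_by omega

theorem nd_min (cs : List Char) (i q : Nat) (h1 : i < q) (h2 : cs[q]? ≠ cs[i]?) :
    ndspec cs i ≤ q := by
  by_contra h
  exact h2 (nd_run cs i q h1 (by omega))

theorem nd_diff (cs : List Char) (i : Nat) (h : ndspec cs i < cs.length) :
    cs[ndspec cs i]? ≠ cs[i]? := by
  rw [ndspec] at h ⊢
  split_ifs at h ⊢ with h1 h2
  · omega
  · exact h2
  · push_neg at h2
    rw [← h2]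
    exact nd_diff cs (i + 1) h
termination_by cs.length - i
decreasing_by omega

theorem ndspec_len (cs : List Char) : ndspec cs cs.length = cs.length := by
  rw [ndspec]; simp

theorem ndspec_unfold (cs : List Char) (i : Nat) (h : i + 1 < cs.length) :
    ndspec cs i = if cs[i + 1]? ≠ cs[i]? then i + 1 else ndspec cs (i + 1) := by
  rw [ndspec, if_neg (by omega)]

theorem pdspec_succ (cs : List Char) (j : Nat) (hj : 1 ≤ j) :
    pdspec cs j = if cs[j - 1]? ≠ cs[j]? then ((j - 1 : Nat) : Int) else pdspec cs (j - 1) := by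
  obtain ⟨j', rfl⟩ : ∃ j', j = j' + 1 := ⟨j - 1, by omega⟩
  simp [pdspec]

-- the closed form B evaluates for the pair (i, j)
def phi (cs : List Char) (i j : Nat) : Int :=
  if cs[i]? ≠ cs[j]? then (j : Int) - i
  else if j < ndspec cs i then 0
  else max (pdspec cs j - (i : Int)) ((j : Int) - (ndspec cs i : Int))

theorem phi_eq_fspec (cs : List Char) (i j : Nat) (hij : i < j) (hj : j < cs.length) :
    fspec cs i j = phi cs i j := by
  rw [fspec, dif_pos hij]
  by_cases hc : cs[i]? = cs[j]?
  · rw [if_neg (not_not_intro hc)]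
    unfold phi
    rw [if_neg (not_not_intro hc)]
    rcases Nat.eq_or_lt_of_le hij with heq | hij2
    · -- j = i + 1, equal endpoints: the two-char range is uniform
      rw [← heq] at hc hj ⊢
      have hnd : ndspec cs i = ndspec cs (i + 1) := by
        rw [ndspec_unfold cs i hj, if_neg (not_not_intro hc.symm)]
      have hgt : i + 1 < ndspec cs (i + 1) := nd_gt cs (i + 1) hj
      rw [if_pos (by omega)]
      simp [fspec_self]
    · -- i + 1 < j
      obtain ⟨j', rfl⟩ : ∃ j', j = j' + 1 := ⟨j - 1, by omega⟩
      have e1 : fspec cs i (j' + 1 - 1) = phi cs i j' := by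
        rw [Nat.add_sub_cancel]; exact phi_eq_fspec cs i j' (by omega) (by omega)
      have e2 : fspec cs (i + 1) (j' + 1) = phi cs (i + 1) (j' + 1) :=
        phi_eq_fspec cs (i + 1) (j' + 1) (by omega) hj
      rw [e1, e2]
      have hii : i + 1 < cs.length := by omega
      by_cases hA : cs[i + 1]? = cs[i]?
      · -- run continues at i
        have hndi : ndspec cs i = ndspec cs (i + 1) := by
          rw [ndspec_unfold cs i hii, if_neg (not_not_intro hA)]
        have hnd1 : i + 1 < ndspec cs (i + 1) := nd_gt cs (i + 1) hii
        by_cases hB : cs[j']? = cs[j' + 1]?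
        · -- all four endpoints equal
          have hpd : pdspec cs (j' + 1) = pdspec cs j' := by
            simp [pdspec, not_not_intro hB]
          unfold phi
          rw [if_neg (not_not_intro (hc.trans hB.symm)),
              if_neg (not_not_intro (hA.trans hc))]
          rcases lt_trichotomy (j' + 1) (ndspec cs i) with hlt | heq2 | hgt2
          · rw [if_pos (by omega), if_pos (by rw [← hndi]; omega), if_pos (by omega)]
            simp
          · exfalso
            have hd := nd_diff cs i (by omega)
            rw [← heq2] at hd
            exact hd hc.symm
          · have hd := nd_diff cs i (by omega : ndspec cs i < cs.length)
            have hndgt : i < ndspec cs i := nd_gt cs i (by omega)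
            have hne : ndspec cs i ≠ j' := by
              intro hh
              rw [hh] at hd
              exact hd (hB.trans hc.symm)
            have hle : ndspec cs i ≤ j' := by omega
            rw [if_neg (by omega), if_neg (by rw [← hndi]; omega), if_neg (by omega), hpd, hndi]
            push_cast
            omega
        · -- character changes just before j
          have hpd : pdspec cs (j' + 1) = (j' : Int) := by
            simp [pdspec, hB]
          have hndle2 : ndspec cs i ≤ j' :=
            nd_min cs i j' (by omega) (fun hh => hB (hh.trans hc))
          unfold phi
          rw [if_pos (fun hh => hB ((hh.symm.trans hc))),
              if_neg (not_not_intro (hA.trans hc))]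
          rw [if_neg (by rw [← hndi]; omega), if_neg (by omega), hpd, hndi]
          push_cast
          omega
      · -- character changes right after i: ndspec i = i + 1
        have hndi : ndspec cs i = i + 1 := by
          rw [ndspec_unfold cs i hii, if_pos hA]
        have h2' : cs[i + 1]? ≠ cs[j' + 1]? := fun hh => hA (hh.trans hc.symm)
        by_cases hB : cs[j']? = cs[j' + 1]?
        · have hpd : pdspec cs (j' + 1) = pdspec cs j' := by
            simp [pdspec, not_not_intro hB]
          unfold phi
          rw [if_neg (not_not_intro (hc.trans hB.symm)), if_pos h2']
          rw [if_neg (by omega), if_neg (by omega), hpd, hndi]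
          push_cast
          omega
        · have hpd : pdspec cs (j' + 1) = (j' : Int) := by
            simp [pdspec, hB]
          unfold phi
          rw [if_pos (fun hh => hB (hh.symm.trans hc)), if_pos h2']
          rw [if_neg (by omega), hpd, hndi]
  · rw [if_pos hc]
    unfold phi
    rw [if_pos hc]
termination_by j - i
decreasing_by all_goals omega

-- list-sum / Finset-sum bridge for mapped ranges
theorem sum_map_range (m : Nat) (f : Nat → Int) :
    ((List.range m).map f).sum = ∑ x ∈ Finset.range m, f x := by
  induction m with
  | zero => simp
  | succ m ih => rw [List.range_succ, Finset.sum_range_succ]; simp [ih]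

-- ===== A-side =====

theorem beauty_row (cs : List Char) (k i : Nat) (hk : 1 ≤ k) (hkn : k ≤ cs.length)
    (hi : i < cs.length - k) :
    beauty cs (rowA cs (k - 1)) (i : Int) (k : Int) = fspec cs i (i + k) := by
  have h1 : ((i : Int) + k) = ((i + k : Nat) : Int) := by push_cast; ring
  simp only [beauty, h1, PySem.List.pyGet?_natCast]
  have hi1 : i < cs.length - (k - 1) := by omega
  have hi2 : i + 1 < cs.length - (k - 1) := by omega
  have d1 : PySem.List.pyGetD (rowA cs (k - 1)) (i : Int) 0 = fspec cs i (i + (k - 1)) := by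
    rw [PySem.List.pyGetD_natCast]
    exact PySem.List.getD_map_range _ _ _ 0 hi1
  have d2 : PySem.List.pyGetD (rowA cs (k - 1)) ((i : Int) + 1) 0
      = fspec cs (i + 1) (i + 1 + (k - 1)) := by
    have hcast : ((i : Int) + 1) = ((i + 1 : Nat) : Int) := by push_cast; ring
    rw [hcast, PySem.List.pyGetD_natCast]
    exact PySem.List.getD_map_range _ _ _ 0 hi2
  rw [d1, d2]
  have ha : i + (k - 1) = i + k - 1 := by omega
  have hb : i + 1 + (k - 1) = i + k := by omega
  rw [ha, hb]
  conv_rhs => rw [fspec, dif_pos (by omega : i < i + k)]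

theorem newdp_row (cs : List Char) (k : Nat) (hk : 1 ≤ k) (hkn : k ≤ cs.length) :
    (PySem.List.pyRange 0 ((cs.length : Int) - k) 1).foldl
      (fun acc i => acc ++ [beauty cs (rowA cs (k - 1)) i (k : Int)]) [] = rowA cs k := by
  rw [PySem.List.foldl_append_singleton_eq_map, PySem.List.pyRange_one, List.map_map,
      List.nil_append]
  have hnk : (((cs.length : Int) - k) - 0).toNat = cs.length - k := by omega
  rw [hnk]
  unfold rowA
  apply List.map_congr_left
  intro t ht
  simp only [List.mem_range] at ht
  simp only [Function.comp_apply, zero_add]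
  exact beauty_row cs k t hk hkn ht

theorem loopA (cs : List Char) (K : Nat) (hK : K ≤ cs.length) :
    (PySem.List.pyRange 1 (K : Int) 1).foldl (stepA cs (cs.length : Int)) (0, rowA cs 0)
      = (∑ k ∈ Finset.Ico 1 K, (rowA cs k).sum, rowA cs (K - 1)) := by
  induction K with
  | zero => rw [PySem.List.pyRange_one_eq_nil (by omega)]; simp
  | succ K ih =>
    rcases Nat.eq_zero_or_pos K with rfl | hKpos
    · rw [PySem.List.pyRange_one_eq_nil (by norm_num)]; simp
    · have hcast : ((K + 1 : Nat) : Int) = (K : Int) + 1 := by push_cast; ring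
      rw [hcast, PySem.List.pyRange_one_succ_right (by exact_mod_cast hKpos), List.foldl_append,
          ih (by omega)]
      simp only [List.foldl_cons, List.foldl_nil, stepA]
      rw [newdp_row cs K hKpos (by omega)]
      rw [Finset.sum_Ico_succ_top (by omega : 1 ≤ K)]
      rw [Nat.add_sub_cancel]

theorem solutionA_val (s : String) :
    solution s = ∑ k ∈ Finset.Ico 1 s.toList.length, (rowA s.toList k).sum := by
  have hrow0 : (PySem.List.pyRange 0 ((s.toList.length : Int)) 1).map (fun _ => (0 : Int))
      = rowA s.toList 0 := by
    rw [PySem.List.pyRange_one, List.map_map]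
    have h0 : (((s.toList.length : Int)) - 0).toNat = s.toList.length := by omega
    rw [h0]
    unfold rowA
    rw [Nat.sub_zero]
    apply List.map_congr_left
    intro t _
    simp [fspec_self]
  simp only [solution, PySem.List.len_eq]
  rw [hrow0, loopA s.toList s.toList.length le_rfl]

-- ===== B-side =====

theorem pdFold (cs : List Char) (J : Nat) :
    (PySem.List.pyRange 0 (J : Int) 1).foldl (pdStep cs) ([], -1)
      = ((List.range J).map (pdspec cs), pdspec cs (J - 1)) := by
  induction J with
  | zero =>
    rw [PySem.List.pyRange_one_eq_nil (by omega)]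
    simp [pdspec]
  | succ J ih =>
    have hcast : ((J + 1 : Nat) : Int) = (J : Int) + 1 := by push_cast; ring
    rw [hcast, PySem.List.pyRange_one_succ_right (by omega), List.foldl_append, ih]
    simp only [List.foldl_cons, List.foldl_nil, pdStep]
    rw [List.range_succ, List.map_append, Nat.add_sub_cancel]
    simp only [List.map_cons, List.map_nil]
    rcases Nat.eq_zero_or_pos J with rfl | hJ
    · norm_num [pdspec]
    · have hJ1 : ((J : Int) - 1) = ((J - 1 : Nat) : Int) := by omega
      rw [hJ1]
      simp only [PySem.List.pyGet?_natCast]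
      rw [pdspec_succ cs J hJ]
      by_cases hne : cs[J - 1]? = cs[J]?
      · rw [if_neg (fun hx => hx.2 hne), if_neg (not_not_intro hne)]
      · rw [if_pos ⟨by exact_mod_cast hJ, hne⟩, if_pos hne]

theorem rangeRev (cs : List Char) (t : Nat) (ht : t < cs.length) :
    PySem.List.pyRange ((cs.length : Int) - 1) ((t : Int) - 1) (-1)
      = PySem.List.pyRange ((cs.length : Int) - 1) (((t + 1 : Nat) : Int) - 1) (-1) ++ [(t : Int)] := by
  have h1 : ((t + 1 : Nat) : Int) - 1 = (t : Int) := by push_cast; ring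
  rw [h1, PySem.List.pyRange_neg_one_eq_reverse, PySem.List.pyRange_neg_one_eq_reverse]
  have h2 : (t : Int) - 1 + 1 = (t : Int) := by ring
  have h3 : ((cs.length : Int) - 1) + 1 = (cs.length : Int) := by ring
  rw [h2, h3]
  rw [PySem.List.pyRange_one_cons (by exact_mod_cast ht)]
  rw [List.reverse_cons]

theorem ndspec_int (cs : List Char) (t : Nat) (h : t < cs.length) :
    ((ndspec cs t : Nat) : Int)
      = if (t : Int) < (cs.length : Int) - 1 ∧ cs[t + 1]? ≠ cs[t]? then (t : Int) + 1
        else ((ndspec cs (t + 1) : Nat) : Int) := by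
  by_cases hc : cs.length ≤ t + 1
  · rw [if_neg (by rintro ⟨h', -⟩; omega)]
    rw [show t + 1 = cs.length from by omega, ndspec_len]
    rw [ndspec, if_pos hc]
  · rw [ndspec_unfold cs t (by omega)]
    by_cases hcc : cs[t + 1]? = cs[t]?
    · rw [if_neg (not_not_intro hcc), if_neg (by rintro ⟨-, h'⟩; exact h' hcc)]
    · rw [if_pos hcc, if_pos ⟨by omega, hcc⟩]; push_cast; ring

theorem ndFold (cs : List Char) (d : Nat) (hd : d ≤ cs.length) :
    (PySem.List.pyRange ((cs.length : Int) - 1) (((cs.length - d : Nat) : Int) - 1) (-1)).foldl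
        (ndStep cs (cs.length : Int)) ([], (cs.length : Int))
      = ((List.range d).map (fun u => (ndspec cs (cs.length - 1 - u) : Int)),
          (ndspec cs (cs.length - d) : Int)) := by
  induction d with
  | zero =>
    rw [Nat.sub_zero, PySem.List.pyRange_neg_one_eq_nil (by omega)]
    simp [ndspec_len]
  | succ d ih =>
    have ht : cs.length - (d + 1) < cs.length := by omega
    rw [rangeRev cs (cs.length - (d + 1)) ht]
    rw [show cs.length - (d + 1) + 1 = cs.length - d from by omega]
    rw [List.foldl_append, ih (by omega)]
    simp only [List.foldl_cons, List.foldl_nil, ndStep]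
    have harg : ((cs.length - (d + 1) : Nat) : Int) + 1 = ((cs.length - (d + 1) + 1 : Nat) : Int) := by
      push_cast; ring
    rw [harg]
    simp only [PySem.List.pyGet?_natCast]
    have hndx : (if ((cs.length - (d + 1) : Nat) : Int) < (cs.length : Int) - 1 ∧
          cs[cs.length - (d + 1) + 1]? ≠ cs[cs.length - (d + 1)]? then
          ((cs.length - (d + 1) + 1 : Nat) : Int)
        else ((ndspec cs (cs.length - d) : Nat) : Int))
        = ((ndspec cs (cs.length - (d + 1)) : Nat) : Int) := by
      rw [← harg, show cs.length - d = cs.length - (d + 1) + 1 from by omega]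
      exact (ndspec_int cs (cs.length - (d + 1)) ht).symm
    rw [hndx]
    rw [List.range_succ, List.map_append]
    simp only [List.map_cons, List.map_nil]
    rw [show cs.length - 1 - d = cs.length - (d + 1) from by omega]

theorem ndList (cs : List Char) :
    ((PySem.List.pyRange ((cs.length : Int) - 1) (-1) (-1)).foldl
        (ndStep cs (cs.length : Int)) ([], (cs.length : Int))).1.reverse
      = (List.range cs.length).map (fun i => (ndspec cs i : Int)) := by
  have h := ndFold cs cs.length le_rfl
  rw [show ((cs.length - cs.length : Nat) : Int) - 1 = (-1 : Int) from by simp] at h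
  rw [h]
  apply List.ext_getElem
  · simp
  · intro i h1 h2
    simp only [List.length_map, List.length_range] at h2
    simp only [List.getElem_reverse, List.getElem_map, List.getElem_range, List.length_map,
      List.length_range]
    rw [show cs.length - 1 - (cs.length - 1 - i) = i from by omega]

theorem hfun_eq (cs : List Char) (iN jN : Nat) (hij : iN < jN) (hj : jN < cs.length) :
    (if cs[iN]? ≠ cs[jN]? then ((jN : Int)) - (iN : Int)
     else if PySem.List.pyGetD ((List.range cs.length).map (fun i => (ndspec cs i : Int))) (iN : Int) 0 ≤ (jN : Int) then
       max (PySem.List.pyGetD ((List.range cs.length).map (pdspec cs)) (jN : Int) 0 - (iN : Int))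
           ((jN : Int) - PySem.List.pyGetD ((List.range cs.length).map (fun i => (ndspec cs i : Int))) (iN : Int) 0)
     else 0)
    = fspec cs iN jN := by
  have hndD : PySem.List.pyGetD ((List.range cs.length).map (fun i => (ndspec cs i : Int))) (iN : Int) 0
      = ((ndspec cs iN : Nat) : Int) := by
    rw [PySem.List.pyGetD_natCast]
    exact PySem.List.getD_map_range _ _ _ 0 (by omega)
  have hpdD : PySem.List.pyGetD ((List.range cs.length).map (pdspec cs)) (jN : Int) 0
      = pdspec cs jN := by
    rw [PySem.List.pyGetD_natCast]
    exact PySem.List.getD_map_range _ _ _ 0 hj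
  rw [hndD, hpdD, phi_eq_fspec cs iN jN hij hj]
  unfold phi
  by_cases h1 : cs[iN]? = cs[jN]?
  · rw [if_neg (not_not_intro h1), if_neg (not_not_intro h1)]
    by_cases h2 : ndspec cs iN ≤ jN
    · rw [if_pos (by exact_mod_cast h2), if_neg (by omega)]
    · rw [if_neg (by exact_mod_cast h2), if_pos (by omega)]
  · rw [if_pos h1, if_pos h1]

theorem innerSum (cs : List Char) (iN : Nat) (hi : iN < cs.length) (a : Int) :
    (PySem.List.pyRange ((iN : Int) + 1) ((cs.length : Int)) 1).foldl
      (fun ans j =>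
        if PySem.List.pyGet? cs ((iN : Int)) ≠ PySem.List.pyGet? cs j then ans + (j - (iN : Int))
        else if PySem.List.pyGetD ((List.range cs.length).map (fun i => (ndspec cs i : Int))) ((iN : Int)) 0 ≤ j then
          ans + max (PySem.List.pyGetD ((List.range cs.length).map (pdspec cs)) j 0 - (iN : Int))
            (j - PySem.List.pyGetD ((List.range cs.length).map (fun i => (ndspec cs i : Int))) ((iN : Int)) 0)
        else ans) a
    = a + ∑ u ∈ Finset.range (cs.length - iN - 1), fspec cs iN (iN + 1 + u) := by
  have hbody : (fun (ans j : Int) =>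
        if PySem.List.pyGet? cs ((iN : Int)) ≠ PySem.List.pyGet? cs j then ans + (j - (iN : Int))
        else if PySem.List.pyGetD ((List.range cs.length).map (fun i => (ndspec cs i : Int))) ((iN : Int)) 0 ≤ j then
          ans + max (PySem.List.pyGetD ((List.range cs.length).map (pdspec cs)) j 0 - (iN : Int))
            (j - PySem.List.pyGetD ((List.range cs.length).map (fun i => (ndspec cs i : Int))) ((iN : Int)) 0)
        else ans)
      = (fun (ans j : Int) => ans +
          (if PySem.List.pyGet? cs ((iN : Int)) ≠ PySem.List.pyGet? cs j then j - (iN : Int)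
           else if PySem.List.pyGetD ((List.range cs.length).map (fun i => (ndspec cs i : Int))) ((iN : Int)) 0 ≤ j then
             max (PySem.List.pyGetD ((List.range cs.length).map (pdspec cs)) j 0 - (iN : Int))
               (j - PySem.List.pyGetD ((List.range cs.length).map (fun i => (ndspec cs i : Int))) ((iN : Int)) 0)
           else 0)) := by
    funext ans j
    split_ifs <;> ring
  rw [hbody, PySem.List.foldl_add]
  congr 1
  rw [PySem.List.pyRange_one, List.map_map]
  rw [show (((cs.length : Int)) - ((iN : Int) + 1)).toNat = cs.length - iN - 1 from by omega]
  rw [sum_map_range]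
  apply Finset.sum_congr rfl
  intro u hu
  simp only [Finset.mem_range] at hu
  simp only [Function.comp_apply]
  have hcast : ((iN : Int) + 1 + (u : Int)) = ((iN + 1 + u : Nat) : Int) := by push_cast; ring
  rw [hcast]
  simp only [PySem.List.pyGet?_natCast]
  exact hfun_eq cs iN (iN + 1 + u) (by omega) (by omega)

theorem solutionB_val (s : String) :
    solution_alt s = ∑ i ∈ Finset.range s.toList.length,
        ∑ u ∈ Finset.range (s.toList.length - i - 1), fspec s.toList i (i + 1 + u) := by
  simp only [solution_alt, PySem.List.len_eq]
  rw [pdFold s.toList s.toList.length, ndList s.toList]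
  dsimp only
  have hcong : ∀ (acc x : Int), x ∈ PySem.List.pyRange 0 ((s.toList.length : Int)) 1 →
      (PySem.List.pyRange (x + 1) ((s.toList.length : Int)) 1).foldl
        (fun ans j =>
          if PySem.List.pyGet? s.toList x ≠ PySem.List.pyGet? s.toList j then ans + (j - x)
          else if PySem.List.pyGetD ((List.range s.toList.length).map (fun i => (ndspec s.toList i : Int))) x 0 ≤ j then
            ans + max (PySem.List.pyGetD ((List.range s.toList.length).map (pdspec s.toList)) j 0 - x)
              (j - PySem.List.pyGetD ((List.range s.toList.length).map (fun i => (ndspec s.toList i : Int))) x 0)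
          else ans) acc
      = acc + ∑ u ∈ Finset.range (s.toList.length - x.toNat - 1), fspec s.toList x.toNat (x.toNat + 1 + u) := by
    intro acc x hx
    rw [PySem.List.mem_pyRange_one] at hx
    obtain ⟨hx0, hxn⟩ := hx
    have hxx : x = ((x.toNat : Nat) : Int) := by omega
    rw [hxx]
    exact innerSum s.toList x.toNat (by omega) acc
  refine (PySem.List.foldl_congr_mem _ _ _ 0 hcong).trans ?_
  rw [PySem.List.foldl_add]
  rw [zero_add, PySem.List.pyRange_one, List.map_map]
  rw [show (((s.toList.length : Int)) - 0).toNat = s.toList.length from by omega]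
  rw [sum_map_range]
  apply Finset.sum_congr rfl
  intro i hi
  simp only [Function.comp_apply, zero_add, Int.toNat_natCast]

theorem reindex (cs : List Char) :
    ∑ k ∈ Finset.Ico 1 cs.length, (rowA cs k).sum
      = ∑ i ∈ Finset.range cs.length,
          ∑ u ∈ Finset.range (cs.length - i - 1), fspec cs i (i + 1 + u) := by
  have hrow : ∀ k, 1 ≤ k → k < cs.length → (rowA cs k).sum
      = ∑ i ∈ Finset.range cs.length, (if 1 ≤ k ∧ i + k < cs.length then fspec cs i (i + k) else 0) := by
    intro k hk1 hk2
    unfold rowA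
    rw [sum_map_range]
    calc ∑ i ∈ Finset.range (cs.length - k), fspec cs i (i + k)
        = ∑ i ∈ Finset.range (cs.length - k),
            (if 1 ≤ k ∧ i + k < cs.length then fspec cs i (i + k) else 0) :=
          Finset.sum_congr rfl (fun i hi => by
            simp only [Finset.mem_range] at hi
            rw [if_pos ⟨hk1, by omega⟩])
      _ = ∑ i ∈ Finset.range cs.length,
            (if 1 ≤ k ∧ i + k < cs.length then fspec cs i (i + k) else 0) := by
          apply Finset.sum_subset
          · intro x hx
            simp only [Finset.mem_range] at hx ⊢
            omega
          intro i _ hni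
          simp only [Finset.mem_range, not_lt] at hni
          rw [if_neg]
          rintro ⟨-, h'⟩
          omega
  have hA : ∑ k ∈ Finset.Ico 1 cs.length, (rowA cs k).sum
      = ∑ k ∈ Finset.range cs.length, ∑ i ∈ Finset.range cs.length,
          (if 1 ≤ k ∧ i + k < cs.length then fspec cs i (i + k) else 0) := by
    calc ∑ k ∈ Finset.Ico 1 cs.length, (rowA cs k).sum
        = ∑ k ∈ Finset.Ico 1 cs.length, ∑ i ∈ Finset.range cs.length,
            (if 1 ≤ k ∧ i + k < cs.length then fspec cs i (i + k) else 0) :=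
          Finset.sum_congr rfl (fun k hk => by
            simp only [Finset.mem_Ico] at hk
            exact hrow k hk.1 hk.2)
      _ = ∑ k ∈ Finset.Ico 0 cs.length, ∑ i ∈ Finset.range cs.length,
            (if 1 ≤ k ∧ i + k < cs.length then fspec cs i (i + k) else 0) := by
          apply Finset.sum_subset (Finset.Ico_subset_Ico (Nat.zero_le 1) le_rfl)
          intro k hk hnk
          simp only [Finset.mem_Ico] at hk hnk
          have hk0 : k = 0 := by omega
          subst hk0
          exact Finset.sum_eq_zero (fun i _ => by rw [if_neg (by rintro ⟨h', -⟩; omega)])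
      _ = ∑ k ∈ Finset.range cs.length, ∑ i ∈ Finset.range cs.length,
            (if 1 ≤ k ∧ i + k < cs.length then fspec cs i (i + k) else 0) := by
          rw [Finset.range_eq_Ico]
  have hB : ∀ i, i < cs.length → ∑ u ∈ Finset.range (cs.length - i - 1), fspec cs i (i + 1 + u)
      = ∑ k ∈ Finset.range cs.length, (if 1 ≤ k ∧ i + k < cs.length then fspec cs i (i + k) else 0) := by
    intro i hi
    have h1 : ∑ k ∈ Finset.range cs.length, (if 1 ≤ k ∧ i + k < cs.length then fspec cs i (i + k) else 0)
        = ∑ k ∈ Finset.Ico 1 (cs.length - i), (if 1 ≤ k ∧ i + k < cs.length then fspec cs i (i + k) else 0) := by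
      symm
      apply Finset.sum_subset
      · intro x hx
        simp only [Finset.mem_Ico] at hx
        simp only [Finset.mem_range]
        omega
      · intro x hx hnx
        simp only [Finset.mem_range] at hx
        simp only [Finset.mem_Ico, not_and, not_lt] at hnx
        rw [if_neg]
        rintro ⟨ha, hb⟩
        have := hnx ha
        omega
    rw [h1, Finset.sum_Ico_eq_sum_range]
    apply Finset.sum_congr rfl
    intro u hu
    simp only [Finset.mem_range] at hu
    rw [show i + (1 + u) = i + 1 + u from by omega]
    rw [if_pos ⟨by omega, by omega⟩]
  rw [hA, Finset.sum_comm]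
  exact Finset.sum_congr rfl (fun i hi => (hB i (by simpa using hi)).symm)

-- ===== VERDICT (by name: the statement is the Claim_ definition above) =====
theorem solution_spec : Claim_equal_solution := by
  intro s _hdom
  unfold Spec_solution
  rw [solutionA_val, solutionB_val]
  exact reindex s.toList
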